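-- pv_equiv track=rewrite | github.com/hexiaoweiff8/MyLeetCode | code/NC2105.py | minimumRefill
-- ===== SOURCE A (Python) =====
-- def minimumRefill(plants, capacityA, capacityB):
--     """
--     :type plants: List[int]
--     :type capacityA: int
--     :type capacityB: int
--     :rtype: int
--     """
--     i, j, refill = 0, len(plants) - 1, 0
--     a, b = capacityA, capacityB
--     if i == j:
--         return 0
--     while i < j:
--         if a < plants[i]:
--             a = capacityA
--             refill += 1
--         a -= plants[i]
--         i += 1
--         if b < plants[j]:
--             b = capacityB
--             refill += 1
--         b -= plants[j]
--         j -= 1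
--     return refill + (1 if i == j and a < plants[i] and b < plants[i] else 0)
-- ===== SOURCE B (Python) =====
-- def _refills(cap, seg):
--     # prefix sums of the segment, computed once
--     pre = []
--     s = 0
--     for p in seg:
--         s += p
--         pre.append(s)
--     # refill happens exactly when the prefix sum passes the moving threshold base + cap;
--     # base is the prefix sum consumed before the last refill
--     count, base = 0, 0
--     for p, q in zip(seg, pre):
--         if q > base + cap:
--             count += 1
--             base = q - p
--     total = pre[-1] if pre else 0
--     return count, cap - (total - base)
--
--
-- def minimumRefill(plants, capacityA, capacityB):
--     n = len(plants)
--     mid = n // 2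
--     cA, leftA = _refills(capacityA, plants[:mid])
--     cB, leftB = _refills(capacityB, plants[n - mid:][::-1])
--     total = cA + cB
--     if n % 2 == 1 and leftA < plants[mid] and leftB < plants[mid]:
--         total += 1
--     return total
-- ===== Notes on version B (the rewrite author's own statement) =====
-- stated objective: alternative
-- what changed: Instead of A's interleaved two-pointer simulation of remaining water, B precomputes the prefix sums of each gardener's half and counts refills by a moving-threshold scan (refill exactly when the prefix sum passes base+capacity, base being the prefix consumed before the last refill), with a separate middle-plant check for odd length.
-- intended difference: On a single-plant list whose plant exceeds both capacities, A's early 'if i == j: return 0' returns 0 while B returns 1; by the problem's own middle-plant rule (which A applies when two pointers meet) the gardener with more water still needs one refill, so 1 is the intended value. — e.g. on minimumRefill([5], 2, 3): A returns 0, B returns 1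
import Mathlib
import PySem

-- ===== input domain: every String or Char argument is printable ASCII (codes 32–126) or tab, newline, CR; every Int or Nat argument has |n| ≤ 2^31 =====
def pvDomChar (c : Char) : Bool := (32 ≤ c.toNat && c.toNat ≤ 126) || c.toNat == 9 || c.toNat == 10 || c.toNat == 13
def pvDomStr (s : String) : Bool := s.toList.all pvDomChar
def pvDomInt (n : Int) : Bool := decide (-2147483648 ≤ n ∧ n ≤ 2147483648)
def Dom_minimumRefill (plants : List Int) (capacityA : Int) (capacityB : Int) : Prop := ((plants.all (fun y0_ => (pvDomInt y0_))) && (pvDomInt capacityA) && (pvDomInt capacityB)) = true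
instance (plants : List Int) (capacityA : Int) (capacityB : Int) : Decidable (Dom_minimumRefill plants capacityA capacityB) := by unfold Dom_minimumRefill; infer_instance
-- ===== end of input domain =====

-- B drops A's interleaved two-pointer water simulation: it precomputes prefix sums per
-- gardener's half and counts refills by a moving-threshold scan over them (objective: alternative).

-- ===== PORT A =====
-- the while-loop of A: state (i, j, refill, a, b); indices are always in range when read
def minimumRefillLoop (plants : List Int) (capacityA : Int) (capacityB : Int)
    (i j refill a b : Int) : Int :=
  if h : i < j then
    let pi := PySem.List.pyGetD plants i 0
    let a1 := if a < pi then capacityA else a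
    let r1 := if a < pi then refill + 1 else refill
    let a2 := a1 - pi
    let pj := PySem.List.pyGetD plants j 0
    let b1 := if b < pj then capacityB else b
    let r2 := if b < pj then r1 + 1 else r1
    let b2 := b1 - pj
    minimumRefillLoop plants capacityA capacityB (i + 1) (j - 1) r2 a2 b2
  else
    refill + (if i = j ∧ a < PySem.List.pyGetD plants i 0 ∧ b < PySem.List.pyGetD plants i 0 then 1 else 0)
termination_by (j - i).toNat
decreasing_by omega

def minimumRefill (plants : List Int) (capacityA : Int) (capacityB : Int) : Int :=
  let i : Int := 0
  let j : Int := (plants.length : Int) - 1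
  if i = j then 0
  else minimumRefillLoop plants capacityA capacityB i j 0 capacityA capacityB

-- ===== PORT B =====
-- prefix sums of a segment (the first Python loop of _refills, with running sum s)
def preSums (s : Int) : List Int → List Int
  | [] => []
  | p :: ps => (s + p) :: preSums (s + p) ps

-- one step of the moving-threshold scan: state (count, base), input (plant, its prefix sum)
def scanStep (cap : Int) : Int × Int → Int × Int → Int × Int
  | (count, base), (p, q) => if q > base + cap then (count + 1, q - p) else (count, base)

-- Python _refills: returns (refill count, leftover water)
def refillsAlt (cap : Int) (seg : List Int) : Int × Int :=
  let pre := preSums 0 seg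
  let cb := (seg.zip pre).foldl (scanStep cap) (0, 0)
  let total := match pre.getLast? with | some t => t | none => 0
  (cb.1, cap - (total - cb.2))

def minimumRefill_alt (plants : List Int) (capacityA : Int) (capacityB : Int) : Int :=
  let n := plants.length
  let mid := n / 2
  let ra := refillsAlt capacityA (plants.take mid)
  let rb := refillsAlt capacityB ((plants.drop (n - mid)).reverse)
  let t := ra.1 + rb.1
  if n % 2 = 1 ∧ ra.2 < PySem.List.pyGetD plants (mid : Int) 0 ∧ rb.2 < PySem.List.pyGetD plants (mid : Int) 0
  then t + 1 else t

-- ===== PRECONDITION & SPEC =====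
-- On a single plant that exceeds both capacities A short-circuits to 0, ignoring its own middle rule;
-- B returns 1, the intended count (the gardener with more water must still refill once).
def D_minimumRefill (plants : List Int) (capacityA : Int) (capacityB : Int) : Prop :=
  plants.length = 1 ∧ capacityA < plants.getD 0 0 ∧ capacityB < plants.getD 0 0
instance (plants : List Int) (capacityA : Int) (capacityB : Int) : Decidable (D_minimumRefill plants capacityA capacityB) := by unfold D_minimumRefill; infer_instance

def Spec_minimumRefill (plants : List Int) (capacityA : Int) (capacityB : Int) (out : Int) : Prop := ¬ D_minimumRefill plants capacityA capacityB → out = minimumRefill_alt plants capacityA capacityB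
instance (plants : List Int) (capacityA : Int) (capacityB : Int) (out : Int) : Decidable (Spec_minimumRefill plants capacityA capacityB out) := by unfold Spec_minimumRefill; infer_instance

def pvDiffWitness_minimumRefill : List Int × Int × Int := ([5], 2, 3)
def pvDiffWitnessOut_minimumRefill : Int × Int := (0, 1)

-- ===== CLAIM (what is proved, stated in full; the proofs are below) =====
def Claim_unchanged_minimumRefill : Prop := ∀ (plants : List Int) (capacityA : Int) (capacityB : Int), Dom_minimumRefill plants capacityA capacityB → Spec_minimumRefill plants capacityA capacityB (minimumRefill plants capacityA capacityB)
def Claim_changed_minimumRefill : Prop := Dom_minimumRefill (pvDiffWitness_minimumRefill.1) (pvDiffWitness_minimumRefill.2.1) (pvDiffWitness_minimumRefill.2.2) ∧ D_minimumRefill (pvDiffWitness_minimumRefill.1) (pvDiffWitness_minimumRefill.2.1) (pvDiffWitness_minimumRefill.2.2) ∧ minimumRefill (pvDiffWitness_minimumRefill.1) (pvDiffWitness_minimumRefill.2.1) (pvDiffWitness_minimumRefill.2.2) = pvDiffWitnessOut_minimumRefill.1 ∧ minimumRefill_alt (pvDiffWitness_minimumRefill.1) (pvDiffWitness_minimumRefill.2.1)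 (pvDiffWitness_minimumRefill.2.2) = pvDiffWitnessOut_minimumRefill.2 ∧ pvDiffWitnessOut_minimumRefill.1 ≠ pvDiffWitnessOut_minimumRefill.2
def Claim_exact_minimumRefill : Prop := ∀ (plants : List Int) (capacityA : Int) (capacityB : Int), Dom_minimumRefill plants capacityA capacityB → D_minimumRefill plants capacityA capacityB → minimumRefill plants capacityA capacityB ≠ minimumRefill_alt plants capacityA capacityB

-- ===== LEMMAS AND PROOFS =====

-- final water of one gardener after a list of plants
def waterOf (cap a : Int) : List Int → Int
  | [] => a
  | p :: ps => waterOf cap ((if a < p then cap else a) - p) ps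

-- number of refills of one gardener
def cntOf (cap a : Int) : List Int → Int
  | [] => 0
  | p :: ps => (if a < p then 1 else 0) + cntOf cap ((if a < p then cap else a) - p) ps

-- the moving-threshold scan, related to the water simulation via base = s - cap + a
theorem scan_spec (cap : Int) : ∀ (seg : List Int) (s count a : Int),
    (seg.zip (preSums s seg)).foldl (scanStep cap) (count, s - cap + a) =
      (count + cntOf cap a seg, (s + seg.sum) - cap + waterOf cap a seg) := by
  intro seg
  induction seg with
  | nil => intro s count a; simp [preSums, cntOf, waterOf]
  | cons p ps ih =>
    intro s count a
    simp only [preSums, List.zip_cons_cons, List.foldl_cons, scanStep]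
    by_cases h : a < p
    · have hc : s + p > (s - cap + a) + cap := by omega
      rw [if_pos hc, show s + p - p = (s + p) - cap + (cap - p) by ring,
        ih (s + p) (count + 1) (cap - p)]
      simp only [cntOf, waterOf, if_pos h, List.sum_cons, Prod.mk.injEq]
      exact ⟨by ring, by ring⟩
    · have hc : ¬ (s + p > (s - cap + a) + cap) := by omega
      rw [if_neg hc, show s - cap + a = (s + p) - cap + (a - p) by ring,
        ih (s + p) count (a - p)]
      simp only [cntOf, waterOf, if_neg h, List.sum_cons, Prod.mk.injEq]
      exact ⟨by ring, by ring⟩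

theorem preSums_getLast (seg : List Int) (s : Int) (h : seg ≠ []) :
    (preSums s seg).getLast? = some (s + seg.sum) := by
  induction seg generalizing s with
  | nil => simp at h
  | cons p ps ih =>
    cases ps with
    | nil => simp [preSums]
    | cons q qs =>
      rw [preSums, show preSums (s + p) (q :: qs) = (s + p + q) :: preSums (s + p + q) qs from rfl,
        List.getLast?_cons_cons,
        ← show preSums (s + p) (q :: qs) = (s + p + q) :: preSums (s + p + q) qs from rfl,
        ih (s + p) (by simp)]
      congr 1; simp; ring

theorem refillsAlt_spec (cap : Int) (seg : List Int) :
    refillsAlt cap seg = (cntOf cap cap seg, waterOf cap cap seg) := by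
  have key := scan_spec cap seg 0 0 cap
  rw [show (0:Int) - cap + cap = 0 by ring] at key
  cases seg with
  | nil => simp [refillsAlt, preSums, cntOf, waterOf]
  | cons p ps =>
    simp only [refillsAlt, key, preSums_getLast (p :: ps) 0 (by simp)]
    simp only [List.sum_cons, Prod.mk.injEq]
    exact ⟨by ring, by ring⟩

-- the interleaved loop, rewritten over the remaining segment of plants
def loopL (capA capB : Int) : List Int → Int → Int → Int → Int
  | [], refill, _, _ => refill
  | [x], refill, a, b => refill + (if a < x ∧ b < x then 1 else 0)
  | x :: y :: rest, refill, a, b =>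
    let z := (y :: rest).getLast (by simp)
    let a2 := (if a < x then capA else a) - x
    let r1 := if a < x then refill + 1 else refill
    let b2 := (if b < z then capB else b) - z
    let r2 := if b < z then r1 + 1 else r1
    loopL capA capB ((y :: rest).dropLast) r2 a2 b2
termination_by seg => seg.length
decreasing_by simp

-- one interleaved step on a segment written as head ++ middle ++ last
theorem loopL_step (capA capB x z : Int) (ys : List Int) (refill a b : Int) :
    loopL capA capB (x :: (ys ++ [z])) refill a b =
      loopL capA capB ys
        (if b < z then (if a < x then refill + 1 else refill) + 1
         else (if a < x then refill + 1 else refill))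
        ((if a < x then capA else a) - x)
        ((if b < z then capB else b) - z) := by
  cases ys with
  | nil => simp [loopL]
  | cons u us =>
    rw [show (x :: ((u :: us) ++ [z])) = x :: u :: (us ++ [z]) by simp, loopL]
    simp [show (u :: (us ++ [z])).dropLast = u :: us by
      rw [show u :: (us ++ [z]) = (u :: us) ++ [z] by simp, List.dropLast_concat]]

def rhsL (capA capB : Int) (seg : List Int) (refill a b : Int) : Int :=
  refill + cntOf capA a (seg.take (seg.length / 2))
    + cntOf capB b ((seg.drop (seg.length - seg.length / 2)).reverse)
    + (if seg.length % 2 = 1 ∧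
          waterOf capA a (seg.take (seg.length / 2)) < seg.getD (seg.length / 2) 0 ∧
          waterOf capB b ((seg.drop (seg.length - seg.length / 2)).reverse) < seg.getD (seg.length / 2) 0
       then 1 else 0)

theorem loopL_spec_aux (capA capB : Int) : ∀ (n : Nat) (seg : List Int) (refill a b : Int),
    seg.length = n → loopL capA capB seg refill a b = rhsL capA capB seg refill a b := by
  intro n
  induction n using Nat.strong_induction_on with
  | _ n IH =>
    intro seg refill a b hlen
    match seg with
    | [] => simp [loopL, rhsL, cntOf]
    | [x] => simp [loopL, rhsL, cntOf, waterOf]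
    | x :: y :: rest =>
      obtain ⟨ys, z, ht⟩ : ∃ ys z, y :: rest = ys ++ [z] := by
        rcases List.eq_nil_or_concat (y :: rest) with h | ⟨ys, z, h⟩
        · simp at h
        · exact ⟨ys, z, by simpa using h⟩
      rw [show x :: y :: rest = x :: (ys ++ [z]) by rw [← ht], loopL_step]
      have hlt : ys.length < n := by
        have h1 := congrArg List.length ht
        simp at h1 hlen; omega
      rw [IH ys.length hlt ys _ _ _ rfl]
      unfold rhsL
      set L := ys.length with hL
      have e2 : (x :: (ys ++ [z])).length / 2 = L / 2 + 1 := by simp; omega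
      have e4 : L / 2 ≤ L := Nat.div_le_self _ _
      rw [e2]
      have e3 : (x :: (ys ++ [z])).length - (L / 2 + 1) = (L - L / 2) + 1 := by simp; omega
      rw [e3]
      rw [List.take_succ_cons, List.take_append_of_le_length e4]
      rw [List.drop_succ_cons, List.drop_append_of_le_length (Nat.sub_le _ _)]
      have hm2 : (x :: (ys ++ [z])).length % 2 = L % 2 := by simp; omega
      rw [hm2]
      by_cases hp : L % 2 = 1
      · have hlt2 : L / 2 < L := by omega
        have hg : (x :: (ys ++ [z])).getD (L / 2 + 1) 0 = ys.getD (L / 2) 0 := by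
          rw [List.getD_cons_succ, List.getD_append _ _ _ _ hlt2]
        rw [hg]
        simp only [cntOf, waterOf, List.reverse_append, List.reverse_cons, List.reverse_nil,
          List.nil_append, List.singleton_append]
        split_ifs <;> ring
      · have hf : (L % 2 = 1) = False := by simp [hp]
        simp only [hf, cntOf, waterOf, List.reverse_append, List.reverse_cons, List.reverse_nil,
          List.nil_append, List.singleton_append, false_and, if_false]
        split_ifs <;> ring

theorem loopL_spec (capA capB : Int) (seg : List Int) (refill a b : Int) :
    loopL capA capB seg refill a b = rhsL capA capB seg refill a b :=
  loopL_spec_aux capA capB seg.length seg refill a b rfl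

-- loopA equals loopL on the remaining segment plants[i..j]
theorem loopA_eq_loopL (plants : List Int) (capA capB : Int) :
    ∀ (k : Nat) (iN jN : Nat) (r a b : Int), jN + 1 - iN = k → jN < plants.length →
    minimumRefillLoop plants capA capB (iN : Int) (jN : Int) r a b =
      loopL capA capB ((plants.drop iN).take (jN + 1 - iN)) r a b := by
  intro k
  induction k using Nat.strong_induction_on with
  | _ k IH =>
    intro iN jN r a b hk hj
    rcases Nat.lt_trichotomy iN jN with hij | hij | hij
    · -- loop body runs
      have hij' : (iN : Int) < (jN : Int) := by exact_mod_cast hij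
      rw [minimumRefillLoop, dif_pos hij']
      have hiR : PySem.List.pyGetD plants (iN : Int) 0 = plants.getD iN 0 := by
        simp [PySem.List.pyGetD_natCast]
      have hjR : PySem.List.pyGetD plants (jN : Int) 0 = plants.getD jN 0 := by
        simp [PySem.List.pyGetD_natCast]
      have hcast : ((iN : Int) + 1) = ((iN + 1 : Nat) : Int) := by push_cast; ring
      have hcast2 : ((jN : Int) - 1) = ((jN - 1 : Nat) : Int) := by omega
      rw [hiR, hjR, hcast, hcast2,
        IH (jN - 1 + 1 - (iN + 1)) (by omega) (iN + 1) (jN - 1) _ _ _ rfl (by omega)]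
      -- decompose the segment as head :: middle ++ [last]
      have hi : iN < plants.length := by omega
      have hseg : (plants.drop iN).take (jN + 1 - iN) =
          plants.getD iN 0 :: (((plants.drop (iN + 1)).take (jN - 1 + 1 - (iN + 1))) ++ [plants.getD jN 0]) := by
        rw [List.drop_eq_getElem_cons hi]
        have h1 : jN + 1 - iN = (jN - iN - 1) + 1 + 1 := by omega
        rw [h1, List.take_succ_cons]
        have h2 : jN - 1 + 1 - (iN + 1) = jN - iN - 1 := by omega
        rw [h2]
        have h3 : (jN - iN - 1) + 1 = jN - iN := by omega
        have hgd : (plants.drop (iN + 1))[jN - iN - 1]? = some (plants.getD jN 0) := by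
          rw [List.getElem?_drop]
          have : iN + 1 + (jN - iN - 1) = jN := by omega
          rw [this, List.getElem?_eq_getElem hj, List.getD_eq_getElem _ _ hj]
        rw [List.take_add_one, hgd]
        simp [List.getD, List.getElem?_eq_getElem hi]
      rw [hseg, loopL_step]
    · -- i == j : the middle plant
      subst hij
      rw [minimumRefillLoop, dif_neg (by omega)]
      have hiR : PySem.List.pyGetD plants (iN : Int) 0 = plants.getD iN 0 := by
        simp [PySem.List.pyGetD_natCast]
      have hseg : (plants.drop iN).take (iN + 1 - iN) = [plants.getD iN 0] := by
        have h1 : iN + 1 - iN = 1 := by omega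
        rw [h1, List.drop_eq_getElem_cons hj, List.take_succ_cons, List.take_zero,
          List.getD_eq_getElem _ _ hj]
      rw [hseg, hiR, loopL]
      simp
    · -- i > j : empty segment, loop exits with refill
      rw [minimumRefillLoop, dif_neg (by omega)]
      have h0 : jN + 1 - iN = 0 := by omega
      rw [h0, List.take_zero, loopL]
      have : ¬ ((iN : Int) = (jN : Int)) := by omega
      simp [this]

theorem minimumRefill_eq (plants : List Int) (capA capB : Int) (h2 : 2 ≤ plants.length) :
    minimumRefill plants capA capB = loopL capA capB plants 0 capA capB := by
  unfold minimumRefill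
  have hne : ¬ ((0 : Int) = (plants.length : Int) - 1) := by omega
  rw [if_neg hne]
  have hcast : (plants.length : Int) - 1 = ((plants.length - 1 : Nat) : Int) := by omega
  rw [hcast, show (0:Int) = ((0:Nat):Int) by simp, loopA_eq_loopL plants capA capB (plants.length - 1 + 1 - 0) 0 (plants.length - 1)
    _ _ _ rfl (by omega)]
  have : plants.length - 1 + 1 - 0 = plants.length := by omega
  rw [this, List.drop_zero, List.take_length]

theorem alt_eq_rhs (plants : List Int) (capA capB : Int) :
    minimumRefill_alt plants capA capB = rhsL capA capB plants 0 capA capB := by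
  unfold minimumRefill_alt rhsL
  simp only [refillsAlt_spec, PySem.List.pyGetD_natCast]
  split_ifs <;> omega

-- ===== VERDICT (by name: the statement is the Claim_ definition above) =====
theorem minimumRefill_spec : Claim_unchanged_minimumRefill := by
  intro plants capA capB _hdom hD
  match hpl : plants with
  | [] =>
    rw [alt_eq_rhs]
    unfold minimumRefill
    rw [if_neg (by norm_num), minimumRefillLoop]
    simp [rhsL, cntOf]
  | [p] =>
    rw [alt_eq_rhs]
    have hD' : ¬ (capA < p ∧ capB < p) := by
      intro hc
      exact hD ⟨by simp, by simpa using hc.1, by simpa using hc.2⟩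
    unfold minimumRefill
    rw [if_pos (by norm_num)]
    simp [rhsL, cntOf, waterOf]
    intro h1
    by_contra h2
    exact hD' ⟨h1, by omega⟩
  | p :: q :: rest =>
    rw [alt_eq_rhs, minimumRefill_eq _ _ _ (by simp), loopL_spec]

theorem minimumRefill_changed : Claim_changed_minimumRefill := by
  unfold Claim_changed_minimumRefill; decide

theorem minimumRefill_tight : Claim_exact_minimumRefill := by
  intro plants capA capB _hdom hD
  obtain ⟨hlen, hA, hB⟩ := hD
  obtain ⟨p, rfl⟩ := List.length_eq_one_iff.mp hlen
  simp only [List.getD, List.getElem?_cons_zero, Option.getD_some] at hA hB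
  have h1 : minimumRefill [p] capA capB = 0 := by
    unfold minimumRefill; rw [if_pos (by norm_num)]
  have h2 : minimumRefill_alt [p] capA capB = 1 := by
    rw [alt_eq_rhs]
    simp [rhsL, cntOf, waterOf, hA, hB]
  rw [h1, h2]; decide
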